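-- pv_equiv track=rewrite | github.com/daniel-reich/ubiquitous-fiesta | GC7JWFhDdhyTsptZ8_17.py | sexy_primes
-- ===== SOURCE A (Python) =====
-- def sexy_primes(n, limit):
--   primes = list(filter(lambda x: list(filter(lambda y: x % y == 0,range(1,x))) == [1],range(2,limit + 1)))
--   lst = []
--   for el in primes:
--     if el + 6 in primes:
--       if n == 2:
--         lst.append((el,el+6))
--       elif n == 3 and el + 12 in primes:
--         lst.append((el,el+6,el+12))
--   return lst
-- ===== SOURCE B (Python) =====
-- def sexy_primes(n, limit):
--     # Sieve of Eratosthenes (set of composites) instead of per-number trial division,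
--     # and set membership instead of list scans for the +6/+12 checks.
--     comps = set()
--     for d in range(2, limit + 1):
--         for k in range(2, limit // d + 1):
--             comps.add(d * k)
--     primes = [i for i in range(2, limit + 1) if i not in comps]
--     ps = set(primes)
--     if n == 2:
--         return [(p, p + 6) for p in primes if p + 6 in ps]
--     if n == 3:
--         return [(p, p + 6, p + 12) for p in primes if p + 6 in ps and p + 12 in ps]
--     return []
-- ===== Notes on version B (the rewrite author's own statement) =====
-- stated objective: faster
-- what changed: Replaces per-number trial division (collect all divisors, compare to [1]) and O(p) list-membership scans with a sieve of Eratosthenes building a composite set once, plus O(1) set membership for the +6/+12 checks.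
import Mathlib
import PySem

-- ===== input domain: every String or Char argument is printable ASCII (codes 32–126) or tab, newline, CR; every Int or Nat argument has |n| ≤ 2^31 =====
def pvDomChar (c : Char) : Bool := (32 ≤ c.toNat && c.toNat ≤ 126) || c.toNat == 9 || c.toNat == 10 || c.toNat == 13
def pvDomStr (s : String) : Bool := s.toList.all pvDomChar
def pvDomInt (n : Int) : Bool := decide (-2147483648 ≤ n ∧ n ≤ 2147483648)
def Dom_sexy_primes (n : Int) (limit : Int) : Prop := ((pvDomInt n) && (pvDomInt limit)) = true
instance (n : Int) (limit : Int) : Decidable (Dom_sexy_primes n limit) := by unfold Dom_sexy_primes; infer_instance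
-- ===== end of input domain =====

-- B replaces A's per-number trial division and list-membership scans with a
-- sieve of Eratosthenes (composite set) and set membership: asymptotically faster.


-- ===== PORT A =====
-- primes = list(filter(lambda x: list(filter(lambda y: x % y == 0, range(1,x))) == [1], range(2, limit+1)))
def aPrimes (limit : Int) : List Int :=
  (PySem.List.pyRange 2 (limit + 1) 1).filter
    (fun x => (PySem.List.pyRange 1 x 1).filter (fun y => PySem.Int.mod x y == 0) == [1])

def sexy_primes (n : Int) (limit : Int) : List (List Int) :=
  let primes := aPrimes limit
  primes.foldl (fun lst el =>
    if primes.contains (el + 6) then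
      if n == 2 then lst ++ [[el, el + 6]]
      else if n == 3 && primes.contains (el + 12) then lst ++ [[el, el + 6, el + 12]]
      else lst
    else lst) []

-- ===== PORT B =====
-- comps = set(); for d in range(2, limit+1): for k in range(2, limit//d + 1): comps.add(d*k)
def altComps (limit : Int) : PySem.Set Int :=
  (PySem.List.pyRange 2 (limit + 1) 1).foldl (fun s d =>
    (PySem.List.pyRange 2 (PySem.Int.floordiv limit d + 1) 1).foldl
      (fun s' k => PySem.Set.add s' (d * k)) s) PySem.Set.empty

-- primes = [i for i in range(2, limit+1) if i not in comps]
def altPrimes (limit : Int) : List Int :=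
  let comps := altComps limit
  (PySem.List.pyRange 2 (limit + 1) 1).filter (fun i => !(PySem.Set.contains comps i))

def sexy_primes_alt (n : Int) (limit : Int) : List (List Int) :=
  let primes := altPrimes limit
  let ps : PySem.Set Int := PySem.Set.ofList primes
  if n == 2 then
    (primes.filter (fun p => PySem.Set.contains ps (p + 6))).map (fun p => [p, p + 6])
  else if n == 3 then
    (primes.filter (fun p => PySem.Set.contains ps (p + 6) && PySem.Set.contains ps (p + 12))).map
      (fun p => [p, p + 6, p + 12])
  else []

-- ===== PRECONDITION & SPEC =====
def Spec_sexy_primes (n : Int) (limit : Int) (out : List (List Int)) : Prop := out = sexy_primes_alt n limit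
instance (n : Int) (limit : Int) (out : List (List Int)) : Decidable (Spec_sexy_primes n limit out) := by unfold Spec_sexy_primes; infer_instance

-- ===== CLAIM (what is proved, stated in full; the proofs are below) =====
def Claim_equal_sexy_primes : Prop := ∀ (n : Int) (limit : Int), Dom_sexy_primes n limit → Spec_sexy_primes n limit (sexy_primes n limit)

-- ===== LEMMAS AND PROOFS =====

-- membership in the nested sieve fold
theorem mem_nested_fold (l : List Int) (f : Int → List Int) (g : Int → Int → Int)
    (s : PySem.Set Int) (y : Int) :
    y ∈ l.foldl (fun s d => (f d).foldl (fun s' k => PySem.Set.add s' (g d k)) s) s ↔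
      y ∈ s ∨ ∃ d ∈ l, ∃ k ∈ f d, y = g d k := by
  induction l generalizing s with
  | nil => simp
  | cons a t ih =>
    rw [List.foldl_cons, ih]
    rw [PySem.Set.mem_foldl_add (f a) (fun k => g a k) s y]
    simp only [List.mem_cons]
    constructor
    · rintro (h | ⟨d, hd, k, hk, rfl⟩)
      · rcases h with h | ⟨k, hk, rfl⟩
        · exact Or.inl h
        · exact Or.inr ⟨a, Or.inl rfl, k, hk, rfl⟩
      · exact Or.inr ⟨d, Or.inr hd, k, hk, rfl⟩
    · rintro (h | ⟨d, hd | hd, k, hk, rfl⟩)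
      · exact Or.inl (Or.inl h)
      · subst hd; exact Or.inl (Or.inr ⟨k, hk, rfl⟩)
      · exact Or.inr ⟨d, hd, k, hk, rfl⟩

theorem mem_altComps (limit y : Int) :
    y ∈ altComps limit ↔
      ∃ d, (2 ≤ d ∧ d ≤ limit) ∧ ∃ k, (2 ≤ k ∧ k ≤ PySem.Int.floordiv limit d) ∧ y = d * k := by
  unfold altComps
  rw [mem_nested_fold]
  simp only [PySem.List.mem_pyRange_one, PySem.Set.empty]
  constructor
  · rintro (h | ⟨d, hd, k, hk, rfl⟩)
    · simp at h
    · exact ⟨d, ⟨hd.1, by omega⟩, k, ⟨hk.1, by omega⟩, rfl⟩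
  · rintro ⟨d, hd, k, hk, rfl⟩
    exact Or.inr ⟨d, ⟨hd.1, by omega⟩, k, ⟨hk.1, by omega⟩, rfl⟩

-- the trial-division test (no divisor of x in [2, x)) characterised
theorem aTest_iff (x : Int) (hx : 2 ≤ x) :
    ((PySem.List.pyRange 1 x 1).filter (fun y => PySem.Int.mod x y == 0) == [1]) = true ↔
      ∀ d : Int, 2 ≤ d → d < x → ¬ d ∣ x := by
  rw [PySem.List.pyRange_one_cons (by omega : (1:Int) < x)]
  have h1 : (PySem.Int.mod x 1 == 0) = true := by
    rw [beq_iff_eq, PySem.Int.mod_eq_emod_of_pos (by omega : (0:Int) < 1)]; simp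
  rw [List.filter_cons, h1, if_pos rfl]
  rw [show ((1 : Int) :: (PySem.List.pyRange (1+1) x).filter (fun y => PySem.Int.mod x y == 0) == [1])
      = ((PySem.List.pyRange (1+1) x).filter (fun y => PySem.Int.mod x y == 0) == ([] : List Int)) from rfl]
  rw [beq_iff_eq, List.filter_eq_nil_iff]
  constructor
  · intro h d h2 hdx hdvd
    exact h d (PySem.List.mem_pyRange_one.mpr ⟨by omega, hdx⟩)
      (by simpa [beq_iff_eq] using (PySem.Int.mod_eq_zero_iff_dvd x d).mpr hdvd)
  · intro h y hy hmod
    have hy' := PySem.List.mem_pyRange_one.mp hy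
    exact h y (by omega) hy'.2 ((PySem.Int.mod_eq_zero_iff_dvd x y).mp (by simpa [beq_iff_eq] using hmod))

-- sieve membership means "has a proper divisor" on [2, limit]
theorem comps_iff (limit x : Int) (hx : 2 ≤ x) (hxl : x ≤ limit) :
    x ∈ altComps limit ↔ ∃ d : Int, 2 ≤ d ∧ d < x ∧ d ∣ x := by
  rw [mem_altComps]
  constructor
  · rintro ⟨d, ⟨hd2, _⟩, k, ⟨hk2, _⟩, rfl⟩
    refine ⟨d, hd2, ?_, ⟨k, rfl⟩⟩
    nlinarith
  · rintro ⟨d, hd2, hdx, k, rfl⟩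
    have hd0 : 0 < d := by omega
    have hk2 : 2 ≤ k := by nlinarith
    refine ⟨d, ⟨hd2, by omega⟩, k, ⟨hk2, ?_⟩, rfl⟩
    exact (PySem.Int.le_floordiv_iff_mul_le hd0).mpr (by nlinarith)

theorem primes_eq (limit : Int) : aPrimes limit = altPrimes limit := by
  unfold aPrimes altPrimes
  apply List.filter_congr
  intro x hx
  have hx' := PySem.List.mem_pyRange_one.mp hx
  rw [Bool.eq_iff_iff, aTest_iff x hx'.1]
  rw [Bool.not_eq_eq_eq_not, Bool.not_true, ← Bool.not_eq_true,
      PySem.Set.contains_iff, comps_iff limit x hx'.1 (by omega)]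
  constructor
  · rintro h ⟨d, h2, hdx, hdvd⟩; exact h d h2 hdx hdvd
  · intro h d h2 hdx hdvd; exact h ⟨d, h2, hdx, hdvd⟩

theorem contains_ofList (l : List Int) (y : Int) :
    PySem.Set.contains (PySem.Set.ofList l) y = l.contains y := by
  rw [Bool.eq_iff_iff, PySem.Set.contains_iff, PySem.Set.mem_ofList]
  simp

theorem foldl_if_if (L : List Int) (c1 c2 : Int → Bool) (f : Int → List Int) (acc : List (List Int)) :
    L.foldl (fun lst el => if c1 el then (if c2 el then lst ++ [f el] else lst) else lst) acc
      = acc ++ (L.filter (fun el => c1 el && c2 el)).map f := by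
  induction L generalizing acc with
  | nil => simp
  | cons a t ih =>
    rw [List.foldl_cons, ih, List.filter_cons]
    by_cases h1 : c1 a <;> by_cases h2 : c2 a <;> simp [h1, h2]

theorem foldl_const (L : List Int) (acc : List (List Int)) :
    L.foldl (fun lst _ => lst) acc = acc := by
  induction L generalizing acc with
  | nil => rfl
  | cons a t ih => rw [List.foldl_cons, ih]

-- ===== VERDICT (by name: the statement is the Claim_ definition above) =====
theorem sexy_primes_spec : Claim_equal_sexy_primes := by
  intro n limit _
  unfold Spec_sexy_primes sexy_primes sexy_primes_alt
  rw [← primes_eq]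
  simp only [contains_ofList]
  by_cases hn2 : n = 2
  · subst hn2
    have hbody : (fun (lst : List (List Int)) (el : Int) =>
        if (aPrimes limit).contains (el + 6) then
          if (2 : Int) == 2 then lst ++ [[el, el + 6]]
          else if (2 : Int) == 3 && (aPrimes limit).contains (el + 12) then lst ++ [[el, el + 6, el + 12]]
          else lst
        else lst)
      = (fun lst el => if (aPrimes limit).contains (el + 6) then lst ++ [[el, el + 6]] else lst) := by
      funext lst el; split_ifs <;> simp_all
    rw [hbody, PySem.List.foldl_append_if (fun el => (aPrimes limit).contains (el + 6))
        (fun el => [el, el + 6]) (aPrimes limit) []]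
    simp
  · by_cases hn3 : n = 3
    · subst hn3
      have hbody : (fun (lst : List (List Int)) (el : Int) =>
          if (aPrimes limit).contains (el + 6) then
            if (3 : Int) == 2 then lst ++ [[el, el + 6]]
            else if (3 : Int) == 3 && (aPrimes limit).contains (el + 12) then lst ++ [[el, el + 6, el + 12]]
            else lst
          else lst)
        = (fun lst el => if (aPrimes limit).contains (el + 6) then
            (if (aPrimes limit).contains (el + 12) then lst ++ [[el, el + 6, el + 12]] else lst)
          else lst) := by
        funext lst el; split_ifs <;> simp_all
      rw [hbody, foldl_if_if (aPrimes limit) (fun el => (aPrimes limit).contains (el + 6))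
          (fun el => (aPrimes limit).contains (el + 12)) (fun el => [el, el + 6, el + 12]) []]
      simp
    · have hbody : (fun (lst : List (List Int)) (el : Int) =>
          if (aPrimes limit).contains (el + 6) then
            if n == 2 then lst ++ [[el, el + 6]]
            else if n == 3 && (aPrimes limit).contains (el + 12) then lst ++ [[el, el + 6, el + 12]]
            else lst
          else lst)
        = (fun lst _ => lst) := by
        funext lst el; split_ifs <;> simp_all
      rw [hbody, foldl_const]
      have e2 : (n == 2) = false := by simpa using hn2
      have e3 : (n == 3) = false := by simpa using hn3
      simp [e2, e3]
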